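-- pv_equiv track=rewrite | github.com/Dawzy/COSC3P95-A-1 | Q5/DeltaDebug.py | hasBug
-- ===== SOURCE A (Python) =====
-- def processString(input_str):
-- 	output_str = ""
-- 	for char in input_str:
-- 		if char.isupper():
-- 			output_str += char.lower()
-- 		elif char.isnumeric():
-- 			output_str += char * 2
-- 		else:
-- 			output_str += char.upper()
--
-- 	return output_str
--
-- def hasBug(input_str):
-- 	correctOutput = ""
-- 	for char in input_str:
-- 		if char.isupper():
-- 			correctOutput += char.lower()
-- 		elif char.islower():
-- 			correctOutput += char.upper()
-- 		else:
-- 			correctOutput += char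
--
-- 	return correctOutput != processString(input_str)
-- ===== SOURCE B (Python) =====
-- def hasBug(input_str):
-- 	for char in input_str:
-- 		if char.isupper():
-- 			corr = char.lower()
-- 		elif char.islower():
-- 			corr = char.upper()
-- 		else:
-- 			corr = char
-- 		if char.isupper():
-- 			proc = char.lower()
-- 		elif char.isnumeric():
-- 			proc = char * 2
-- 		else:
-- 			proc = char.upper()
-- 		if corr != proc:
-- 			return True
-- 	return False
-- ===== Notes on version B (the rewrite author's own statement) =====
-- stated objective: simpler
-- what changed: B fuses A's two string-building passes into a single early-exiting per-character loop that compares the two transformed pieces directly and never builds either output string.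
import Mathlib
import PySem

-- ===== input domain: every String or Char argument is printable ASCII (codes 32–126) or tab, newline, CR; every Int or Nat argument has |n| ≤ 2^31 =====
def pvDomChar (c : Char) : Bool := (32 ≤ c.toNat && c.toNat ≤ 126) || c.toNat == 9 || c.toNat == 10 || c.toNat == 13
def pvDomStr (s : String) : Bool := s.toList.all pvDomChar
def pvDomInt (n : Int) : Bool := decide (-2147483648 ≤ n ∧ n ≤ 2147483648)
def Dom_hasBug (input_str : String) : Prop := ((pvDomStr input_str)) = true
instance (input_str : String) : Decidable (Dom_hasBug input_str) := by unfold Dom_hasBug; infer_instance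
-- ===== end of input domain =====

-- B fuses A's two string-building passes into one early-exiting per-character loop; objective: simpler.
-- (On the ASCII domain, Python's isnumeric coincides with isdigit; ported as PySem.Chars.isdigit.)

-- ===== PORT A =====
-- strings are handled as List Char (PySem.Chars side); '+=' is an append to the accumulator
def processString (input_str : String) : List Char :=
  input_str.toList.foldl (fun output_str char =>
    if PySem.Chars.isupper char then output_str ++ [PySem.Chars.lowerChar char]
    else if PySem.Chars.isdigit char then output_str ++ [char, char]
    else output_str ++ [PySem.Chars.upperChar char]) []

def hasBug (input_str : String) : Bool :=
  let correctOutput := input_str.toList.foldl (fun correctOutput char =>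
    if PySem.Chars.isupper char then correctOutput ++ [PySem.Chars.lowerChar char]
    else if PySem.Chars.islower char then correctOutput ++ [PySem.Chars.upperChar char]
    else correctOutput ++ [char]) []
  decide (correctOutput ≠ processString input_str)

-- ===== PORT B =====
def hasBugGo : List Char → Bool
  | [] => false
  | char :: rest =>
    let corr : List Char :=
      if PySem.Chars.isupper char then [PySem.Chars.lowerChar char]
      else if PySem.Chars.islower char then [PySem.Chars.upperChar char]
      else [char]
    let proc : List Char :=
      if PySem.Chars.isupper char then [PySem.Chars.lowerChar char]
      else if PySem.Chars.isdigit char then [char, char]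
      else [PySem.Chars.upperChar char]
    if corr ≠ proc then true else hasBugGo rest

def hasBug_alt (input_str : String) : Bool := hasBugGo input_str.toList

-- ===== PRECONDITION & SPEC =====
def Spec_hasBug (input_str : String) (out : Bool) : Prop := out = hasBug_alt input_str
instance (input_str : String) (out : Bool) : Decidable (Spec_hasBug input_str out) := by unfold Spec_hasBug; infer_instance

-- ===== CLAIM (what is proved, stated in full; the proofs are below) =====
def Claim_equal_hasBug : Prop := ∀ (input_str : String), Dom_hasBug input_str → Spec_hasBug input_str (hasBug input_str)

-- ===== LEMMAS AND PROOFS =====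
def pvCorrP (c : Char) : List Char :=
  if PySem.Chars.isupper c then [PySem.Chars.lowerChar c]
  else if PySem.Chars.islower c then [PySem.Chars.upperChar c]
  else [c]

def pvProcP (c : Char) : List Char :=
  if PySem.Chars.isupper c then [PySem.Chars.lowerChar c]
  else if PySem.Chars.isdigit c then [c, c]
  else [PySem.Chars.upperChar c]

lemma pvCorrP_len (c : Char) : (pvCorrP c).length = 1 := by
  unfold pvCorrP; split_ifs <;> rfl

lemma pvProcP_len (c : Char) : 1 ≤ (pvProcP c).length := by
  unfold pvProcP; split_ifs <;> simp

lemma flatMap_corr_len (l : List Char) : (l.flatMap pvCorrP).length = l.length := by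
  induction l with
  | nil => rfl
  | cons c rest ih => simp [List.flatMap_cons, pvCorrP_len, ih]; omega

lemma flatMap_proc_len (l : List Char) : l.length ≤ (l.flatMap pvProcP).length := by
  induction l with
  | nil => simp
  | cons c rest ih =>
    simp only [List.flatMap_cons, List.length_append, List.length_cons]
    have := pvProcP_len c; omega

lemma key_iff (l : List Char) :
    l.flatMap pvCorrP = l.flatMap pvProcP ↔ ∀ c ∈ l, pvCorrP c = pvProcP c := by
  induction l with
  | nil => simp
  | cons c rest ih =>
    simp only [List.flatMap_cons, List.mem_cons, forall_eq_or_imp]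
    constructor
    · intro h
      by_cases hc : pvCorrP c = pvProcP c
      · refine ⟨hc, ih.mp ?_⟩
        rw [hc] at h
        exact List.append_cancel_left h
      · exfalso
        -- lengths: if pvProcP c has length 2 the totals differ; if length 1 heads differ
        have hl := congrArg List.length h
        simp only [List.length_append, flatMap_corr_len] at hl
        have h1 := pvCorrP_len c
        have h2 := pvProcP_len c
        have h3 := flatMap_proc_len rest
        have hplen : (pvProcP c).length = 1 := by omega
        -- both pieces are singletons; equality of appends with singleton heads
        obtain ⟨a, ha⟩ : ∃ a, pvCorrP c = [a] := by
          cases hx : pvCorrP c with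
          | nil => simp [hx] at h1
          | cons x xs => cases xs with
            | nil => exact ⟨x, rfl⟩
            | cons y ys => simp [hx] at h1
        obtain ⟨b, hb⟩ : ∃ b, pvProcP c = [b] := by
          cases hx : pvProcP c with
          | nil => simp [hx] at hplen
          | cons x xs => cases xs with
            | nil => exact ⟨x, rfl⟩
            | cons y ys => simp [hx] at hplen
        rw [ha, hb] at h hc
        simp only [List.cons_append, List.nil_append, List.cons.injEq] at h
        exact hc (by simp [h.1])
    · rintro ⟨h1, h2⟩
      rw [h1, ih.mpr h2]

lemma hasBugGo_eq (l : List Char) :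
    hasBugGo l = decide (¬ ∀ c ∈ l, pvCorrP c = pvProcP c) := by
  induction l with
  | nil => simp [hasBugGo]
  | cons c rest ih =>
    show (if pvCorrP c ≠ pvProcP c then true else hasBugGo rest) = _
    by_cases hc : pvCorrP c = pvProcP c <;> simp [hc, ih]


theorem hasBug_spec : Claim_equal_hasBug := by
  intro input_str _
  unfold Spec_hasBug hasBug hasBug_alt processString
  have hc : (fun (correctOutput : List Char) char =>
      if PySem.Chars.isupper char then correctOutput ++ [PySem.Chars.lowerChar char]
      else if PySem.Chars.islower char then correctOutput ++ [PySem.Chars.upperChar char]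
      else correctOutput ++ [char]) = fun acc c => acc ++ pvCorrP c := by
    funext acc c; unfold pvCorrP; split_ifs <;> rfl
  have hp : (fun (output_str : List Char) char =>
      if PySem.Chars.isupper char then output_str ++ [PySem.Chars.lowerChar char]
      else if PySem.Chars.isdigit char then output_str ++ [char, char]
      else output_str ++ [PySem.Chars.upperChar char]) = fun acc c => acc ++ pvProcP c := by
    funext acc c; unfold pvProcP; split_ifs <;> rfl
  rw [hc, hp, PySem.List.foldl_append_eq_flatMap, PySem.List.foldl_append_eq_flatMap,
    hasBugGo_eq]
  simp [key_iff]
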